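-- pv_equiv track=rewrite | github.com/aws-samples/smallmatter-package | src/smallmatter/common.py | lowerable
-- ===== SOURCE A (Python) =====
-- from collections import Counter
-- from typing import Any, Dict, Iterable, List, Optional, Sequence, Union
--
-- class DuplicateError(Exception):
--     pass
--
-- def lower_uniq(it: Iterable[str]) -> List[str]:
--     """Convert strings to lower case without any conflict.
--
--     A typical use-case is to lowercase the column names of a dataframe.
--
--     Sample usage:
--
--     >>> from smallmatter.common import lower_uniq
--     >>> lower_uniq(["COL_A", "col_B"])
--     ['col_a', 'col_b']
--
--     >>> lower_uniq(["COL_A", "col_B", "col_a", "COL_B"])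
--     # DuplicateError: Duplicated lowercased members: ['col_a', 'col_b']
--
--     Args:
--         it (Iterable[str]): input strings.
--
--     Raises:
--         DuplicateError: when duplicate members are present.
--
--     Returns:
--         List[str]: lower-cased strings in the same order as `it`.
--     """
--     input = list(it)
--     lowercased: List[str] = [s.lower() for s in input]
--     cnt = Counter(lowercased)
--
--     if len(input) != len(cnt):
--         # Friendly error message
--         dups = [k for k, v in cnt.items() if v > 1]
--         raise DuplicateError(f"Duplicated lowercased members: {dups}")
--
--     return lowercased
--
-- def lowerable(src: Sequence[str], dst: Sequence[str]) -> bool: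
--     """Check whether all strings in `src` can be lower_uniq()-ed to `dst` in the exact same sequence.
--
--     Typical use-case: to rename column names of multiple dataframes to same lower-case forms.
--
--     Sample usage:
--
--     >>> from smallmatter.common import lowerable
--     >>> lowerable(src=['col_A', 'COL_B'], dst=['col_a', 'col_b'])
--     # True
--
--     >>> lowerable(src=['COL_B', 'col_A'], dst=['col_a', 'col_b'])
--     # False
--
--     >>> lowerable(src=['col_A', 'COL_B', 'Col_c'], dst=['col_a', 'col_b'])
--     # False
--
--     >>> lowerable(src=[], dst=['col_a', 'col_a'])
--     # DuplicateError: Duplicated dst: ['col_a']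
--
--     >>> lowerable(src=['col_a', 'col_a'], dst=[])
--     # False
--
--     >>> lowerable(src=['col_b', 'COL_B'], dst=[])
--     # False
--
--     Args:
--         src (Iterable[str]): source strings in mixed cases
--         dst (Iterable[str]): target lowercase strings; must be unique.
--
--     Raises:
--         DuplicateError: when `dst` contains duplicated members.
--
--
--     Returns:
--         List[str]: lowerable source strings
--     """
--     # Friendly error message for duplicated `dst` elements.
--     if len(dst) != len(set(dst)):
--         cnt = Counter(dst)
--         dups = [k for k, v in cnt.items() if v > 1]
--         raise DuplicateError(f"Duplicated dst: {dups}")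
--
--     try:
--         lowered_src = lower_uniq(src)
--         return lowered_src == dst
--     except DuplicateError:
--         return False
-- ===== SOURCE B (Python) =====
-- from typing import Sequence
--
-- class DuplicateError(Exception):
--     pass
--
-- def lowerable(src: Sequence[str], dst: Sequence[str]) -> bool:
--     # One streaming pass over dst with a seen-set detects duplicates (no Counter);
--     # the dup list may differ from A's only in order, inside the exception message.
--     seen = set()
--     dups = []
--     for d in dst:
--         if d in seen:
--             if d not in dups:
--                 dups.append(d)
--         else:
--             seen.add(d)
--     if dups:
--         raise DuplicateError(f"Duplicated dst: {dups}")
--     # Element-wise short-circuit comparison: no lowered list is ever built,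
--     # and no src duplicate check is needed (dst is duplicate-free).
--     if len(src) != len(dst):
--         return False
--     return all(s.lower() == d for s, d in zip(src, dst))
-- ===== Notes on version B (the rewrite author's own statement) =====
-- stated objective: alternative
-- what changed: B replaces A's two staged Counter passes (set/Counter over dst, then lower_uniq building a lowered list, a Counter over it and a try/except) by a single seen-set streaming pass over dst plus a length check and an element-wise short-circuit all() over zip(src, dst); no lowered list and no Counter are ever built.
import Mathlib
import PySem

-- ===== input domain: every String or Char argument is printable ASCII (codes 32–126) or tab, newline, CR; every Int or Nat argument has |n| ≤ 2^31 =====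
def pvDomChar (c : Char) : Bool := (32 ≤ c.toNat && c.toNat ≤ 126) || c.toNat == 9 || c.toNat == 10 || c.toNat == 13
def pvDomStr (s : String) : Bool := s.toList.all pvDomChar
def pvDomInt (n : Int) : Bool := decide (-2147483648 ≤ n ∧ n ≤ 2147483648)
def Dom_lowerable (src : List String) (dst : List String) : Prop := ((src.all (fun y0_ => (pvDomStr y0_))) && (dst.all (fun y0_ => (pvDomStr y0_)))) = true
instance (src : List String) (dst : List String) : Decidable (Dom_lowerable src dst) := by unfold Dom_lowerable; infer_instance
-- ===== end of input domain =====

-- B replaces A's staged Counter passes by one seen-set streaming pass over dst plus an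
-- element-wise short-circuit comparison over zip(src, dst); same return value on Pre_.
-- Pre_ excludes inputs where dst has duplicates: there A raises DuplicateError (B raises it too,
-- with a possibly differently ordered dup list in the message).

-- ===== PORT A =====
def lowerable (src : List String) (dst : List String) : Bool :=
  -- if len(dst) != len(set(dst)): raise DuplicateError(...)  -- excluded by Pre_
  if dst.length ≠ PySem.Set.len (PySem.Set.ofList dst) then
    false
  else
    -- lower_uniq(src), with its DuplicateError caught → return False
    let lowered := src.map PySem.Str.lower
    let cnt := PySem.Dict.counter lowered
    if src.length ≠ PySem.Dict.size cnt then
      false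
    else
      lowered == dst

-- ===== PORT B =====
def lowerable_alt (src : List String) (dst : List String) : Bool :=
  -- streaming pass: seen-set + dup list
  let st := dst.foldl
    (fun (st : PySem.Set String × List String) d =>
      if PySem.Set.contains st.1 d then
        if st.2.contains d then st else (st.1, st.2 ++ [d])
      else (PySem.Set.add st.1 d, st.2))
    (PySem.Set.empty, [])
  if st.2 ≠ [] then
    false  -- raise DuplicateError: excluded by Pre_
  else if src.length ≠ dst.length then
    false
  else
    (src.zip dst).all (fun p => PySem.Str.lower p.1 == p.2)

-- ===== PRECONDITION & SPEC =====
-- Pre_ excludes exactly the inputs on which A raises DuplicateError: dst with duplicate members.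
def Pre_lowerable (src : List String) (dst : List String) : Prop := dst.Nodup
instance (src : List String) (dst : List String) : Decidable (Pre_lowerable src dst) := by unfold Pre_lowerable; infer_instance
def pvWitness_lowerable : List String × List String := (["col_A", "COL_B"], ["col_a", "col_b"])
def Spec_lowerable (src : List String) (dst : List String) (out : Bool) : Prop := out = lowerable_alt src dst
instance (src : List String) (dst : List String) (out : Bool) : Decidable (Spec_lowerable src dst out) := by unfold Spec_lowerable; infer_instance

-- ===== CLAIM (what is proved, stated in full; the proofs are below) =====
def Claim_equal_lowerable : Prop := ∀ (src : List String) (dst : List String), Dom_lowerable src dst → Pre_lowerable src dst → Spec_lowerable src dst (lowerable src dst)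

-- ===== LEMMAS AND PROOFS =====

-- The streaming pass collects no dups on a Nodup list disjoint from `seen`.
lemma foldl_dups_nil (l : List String) (seen : PySem.Set String) (dups0 : List String)
    (hd : ∀ d ∈ l, d ∉ seen) (hnd : l.Nodup) :
    (l.foldl
      (fun (st : PySem.Set String × List String) d =>
        if PySem.Set.contains st.1 d then
          if st.2.contains d then st else (st.1, st.2 ++ [d])
        else (PySem.Set.add st.1 d, st.2))
      (seen, dups0)).2 = dups0 := by
  induction l generalizing seen with
  | nil => rfl
  | cons d l ih =>
    have hnotin : d ∉ seen := hd d (List.mem_cons_self ..)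
    have hcontains : PySem.Set.contains seen d = false := by
      simpa [PySem.Set.contains] using hnotin
    simp only [List.foldl_cons, hcontains, Bool.false_eq_true, if_false]
    exact ih (PySem.Set.add seen d)
      (fun e he => by
        rw [PySem.Set.mem_add]
        rintro (h | rfl)
        · exact hd e (List.mem_cons_of_mem _ he) h
        · exact (List.nodup_cons.mp hnd).1 he)
      (List.nodup_cons.mp hnd).2

-- list equality of a mapped list = length check + element-wise check over zip.
lemma map_eq_iff_zip_all (f : String → String) (src dst : List String) :
    (src.map f = dst) ↔
      (src.length = dst.length ∧ (src.zip dst).all (fun p => f p.1 == p.2) = true) := by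
  induction src generalizing dst with
  | nil => cases dst with
    | nil => simp
    | cons d dst => simp
  | cons s src ih =>
    cases dst with
    | nil => simp
    | cons d dst =>
      simp only [List.map_cons, List.cons_eq_cons, List.length_cons, List.zip_cons_cons,
        List.all_cons, Bool.and_eq_true, beq_iff_eq, ih]
      constructor
      · rintro ⟨h1, h2, h3⟩; exact ⟨by omega, h1, h3⟩
      · rintro ⟨h1, h2, h3⟩; exact ⟨h2, by omega, h3⟩

-- len(Counter(xs)) is the number of distinct members of xs.
lemma size_counter_eq (xs : List String) :
    PySem.Dict.size (PySem.Dict.counter xs) = (PySem.Set.ofList xs).length := by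
  have h := PySem.Dict.keys_counter (xs := xs)
  simp [PySem.Dict.size, PySem.Dict.keys] at *
  rw [← h]
  simp

-- ===== VERDICT (by name: the statement is the Claim_ definition above) =====
theorem lowerable_spec : Claim_equal_lowerable := by
  intro src dst _ hpre
  unfold Spec_lowerable lowerable lowerable_alt
  have hdst : PySem.Set.ofList dst = dst := PySem.Set.ofList_eq_self_of_nodup dst hpre
  have hdups := foldl_dups_nil dst PySem.Set.empty [] (by intro d _ h; cases h) hpre
  simp only [hdups, hdst, PySem.Set.len_eq, ne_eq, not_true_eq_false, if_false, ite_not]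
  by_cases heq : src.map PySem.Str.lower = dst
  · -- equal: A's counter check passes (lowered = dst is Nodup) and both sides are true
    have hnd : (src.map PySem.Str.lower).Nodup := heq ▸ hpre
    obtain ⟨hl, hz⟩ := (map_eq_iff_zip_all PySem.Str.lower src dst).mp heq
    rw [size_counter_eq, PySem.Set.ofList_eq_self_of_nodup _ hnd]
    simp [heq, hl, hz]
  · -- not equal: A returns false either way, and so does B
    have hbe : (src.map PySem.Str.lower == dst) = false := by simpa using heq
    have hz : src.length = dst.length →
        ((src.zip dst).all fun p => PySem.Str.lower p.1 == p.2) = false := by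
      intro hl
      cases hall : (src.zip dst).all fun p => PySem.Str.lower p.1 == p.2
      · rfl
      · exact absurd ((map_eq_iff_zip_all PySem.Str.lower src dst).mpr ⟨hl, hall⟩) heq
    rw [hbe]
    by_cases hl : src.length = dst.length
    · simp [hl, hz hl]
    · simp [hl]
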